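-- pv_equiv track=rewrite | github.com/hemidactylus/ostracion | ostracion_app/utilities/tools/setNaming.py | _checkCharDescriptor
-- ===== SOURCE A (Python) =====
-- def _checkCharDescriptor(residualSet, charDescSets):
--     """ Recursively try and see if a whole named set is in the input
--         set: if so, pile up its human-readable description and inspect
--         the next ready-made sets.
--
--         Returns a pair residualSet, nice-descriptions.
--     """
--     if len(charDescSets) == 0:
--         return residualSet, []
--     else:
--         checkSet, thisDesc = charDescSets[0]
--         if all(d in residualSet for d in checkSet):
--             newSet = residualSet - checkSet
--             newDesc = thisDesc
--             furtherSet, furtherDesc = _checkCharDescriptor(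
--                 newSet,
--                 charDescSets[1:],
--             )
--             return furtherSet, [thisDesc] + furtherDesc
--         else:
--             return _checkCharDescriptor(residualSet, charDescSets[1:])
-- ===== SOURCE B (Python) =====
-- def _checkCharDescriptor(residualSet, charDescSets):
--     """Iterative greedy pass: subtract each fully-contained named set,
--     collecting its description; no recursion, no slicing."""
--     residual = residualSet
--     descs = []
--     for checkSet, thisDesc in charDescSets:
--         if all(d in residual for d in checkSet):
--             residual = residual - checkSet
--             descs.append(thisDesc)
--     return residual, descs
-- ===== Notes on version B (the rewrite author's own statement) =====
-- stated objective: simpler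
-- what changed: Replaced the recursion-with-list-slicing by a flat single loop over charDescSets accumulating (residual, descs).
import Mathlib
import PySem

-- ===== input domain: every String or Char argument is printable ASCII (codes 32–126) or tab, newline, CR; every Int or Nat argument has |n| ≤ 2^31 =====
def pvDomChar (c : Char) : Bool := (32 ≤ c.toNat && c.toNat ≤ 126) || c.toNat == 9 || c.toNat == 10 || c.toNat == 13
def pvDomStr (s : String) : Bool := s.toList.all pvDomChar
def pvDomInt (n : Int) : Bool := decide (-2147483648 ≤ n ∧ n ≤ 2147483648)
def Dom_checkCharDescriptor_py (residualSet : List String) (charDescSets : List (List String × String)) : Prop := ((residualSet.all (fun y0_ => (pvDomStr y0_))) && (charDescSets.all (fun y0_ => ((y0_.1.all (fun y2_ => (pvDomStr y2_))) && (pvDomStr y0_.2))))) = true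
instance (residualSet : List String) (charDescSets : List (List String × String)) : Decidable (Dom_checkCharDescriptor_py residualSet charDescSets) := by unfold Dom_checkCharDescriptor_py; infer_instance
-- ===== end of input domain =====

-- B replaces A's recursion-with-slicing by a flat loop accumulating (residual, descs); same cost, simpler.

-- ===== PORT A =====
-- literal port of the recursive A: head/tail recursion over charDescSets
def checkCharDescriptor_py (residualSet : List String) (charDescSets : List (List String × String)) : List String × List String :=
  match charDescSets with
  | [] => (residualSet, [])
  | (checkSet, thisDesc) :: rest =>
    if checkSet.all (fun d => residualSet.contains d) then
      let newSet := PySem.Set.diff residualSet checkSet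
      let further := checkCharDescriptor_py newSet rest
      (further.1, thisDesc :: further.2)
    else
      checkCharDescriptor_py residualSet rest

-- ===== PORT B =====
-- literal port of Source B: one foldl over charDescSets with state (residual, descs)
def checkCharDescriptor_py_alt (residualSet : List String) (charDescSets : List (List String × String)) : List String × List String :=
  charDescSets.foldl
    (fun st p =>
      if p.1.all (fun d => st.1.contains d) then
        (PySem.Set.diff st.1 p.1, st.2 ++ [p.2])
      else st)
    (residualSet, [])

-- ===== PRECONDITION & SPEC =====
def Spec_checkCharDescriptor_py (residualSet : List String) (charDescSets : List (List String × String)) (out : List String × List String) : Prop := out = checkCharDescriptor_py_alt residualSet charDescSets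
instance (residualSet : List String) (charDescSets : List (List String × String)) (out : List String × List String) : Decidable (Spec_checkCharDescriptor_py residualSet charDescSets out) := by unfold Spec_checkCharDescriptor_py; infer_instance

-- ===== CLAIM (what is proved, stated in full; the proofs are below) =====
def Claim_equal_checkCharDescriptor_py : Prop := ∀ (residualSet : List String) (charDescSets : List (List String × String)), Dom_checkCharDescriptor_py residualSet charDescSets → Spec_checkCharDescriptor_py residualSet charDescSets (checkCharDescriptor_py residualSet charDescSets)

-- ===== LEMMAS AND PROOFS =====
-- loop invariant: the fold from any accumulator (r, acc) yields A's result on r with acc prepended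
theorem checkCharDescriptor_fold_eq (cds : List (List String × String)) :
    ∀ (r : List String) (acc : List String),
    cds.foldl
      (fun st p =>
        if p.1.all (fun d => st.1.contains d) then
          (PySem.Set.diff st.1 p.1, st.2 ++ [p.2])
        else st)
      (r, acc)
    = ((checkCharDescriptor_py r cds).1, acc ++ (checkCharDescriptor_py r cds).2) := by
  induction cds with
  | nil => intro r acc; simp [checkCharDescriptor_py]
  | cons hd tl ih =>
    intro r acc
    obtain ⟨cs, desc⟩ := hd
    rw [List.foldl_cons]
    by_cases h : (cs.all fun d => r.contains d) = true
    · rw [if_pos h, ih]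
      simp only [checkCharDescriptor_py, h, if_true]
      simp
    · rw [if_neg h, ih]
      simp only [checkCharDescriptor_py, h]
      simp

-- ===== VERDICT (by name: the statement is the Claim_ definition above) =====
theorem checkCharDescriptor_py_spec : Claim_equal_checkCharDescriptor_py := by
  intro residualSet charDescSets _
  unfold Spec_checkCharDescriptor_py checkCharDescriptor_py_alt
  rw [checkCharDescriptor_fold_eq]
  simp
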